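-- pv_equiv track=rewrite | github.com/emilianohg/pruebas-estadisticas | Pruebas.py | tercia
-- ===== SOURCE A (Python) =====
-- def tercia(numero):
--        long=len(str(numero))
--        numero = (str(numero))[2:long - 1]
--        # Conteo
--        guia = dict.fromkeys(numero, 0)
--        for digito in numero:
--               guia[digito]+=1
--        # Impar
--        for conteo in guia.values():
--               if conteo >= 3:
--                      return True
--        return False
-- ===== SOURCE B (Python) =====
-- def tercia(numero):
--     s = str(numero)
--     s = s[2:len(s) - 1]
--     t = sorted(s)
--     return any(a == b == c for a, b, c in zip(t, t[1:], t[2:]))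
-- ===== Notes on version B (the rewrite author's own statement) =====
-- stated objective: alternative
-- what changed: Replaces A's frequency-dict build plus values scan with sort-then-scan: sort the sliced string and report whether any three adjacent characters are equal (equal characters are contiguous after sorting), with no counting structure at all.
import Mathlib
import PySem

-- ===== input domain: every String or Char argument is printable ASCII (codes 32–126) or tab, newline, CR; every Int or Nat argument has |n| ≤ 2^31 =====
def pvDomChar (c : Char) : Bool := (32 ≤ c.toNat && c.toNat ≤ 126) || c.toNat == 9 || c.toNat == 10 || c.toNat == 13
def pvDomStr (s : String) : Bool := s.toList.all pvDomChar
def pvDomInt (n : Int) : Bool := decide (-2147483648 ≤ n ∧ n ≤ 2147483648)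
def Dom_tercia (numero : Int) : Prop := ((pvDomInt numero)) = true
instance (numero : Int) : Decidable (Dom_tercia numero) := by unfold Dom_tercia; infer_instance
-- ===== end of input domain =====

-- B replaces A's frequency-dict counting with sort-then-scan: after sorting the
-- sliced string, a character occurs three times iff three equal characters are
-- adjacent (objective: alternative algorithm, no counting structure).

-- ===== PORT A =====
def tercia (numero : Int) : Bool :=
  let long : Int := (PySem.Int.toChars numero).length
  let s : List Char := PySem.List.slice (PySem.Int.toChars numero) (some 2) (some (long - 1))
  let guia : PySem.Dict Char Int := PySem.Dict.ofList (s.map (fun d => (d, (0 : Int))))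
  let guia := s.foldl (fun g digito => g.modify digito 0 (fun x => x + 1)) guia
  (PySem.Dict.values guia).any (fun conteo => decide (3 ≤ conteo))

-- ===== PORT B =====
def tercia_alt (numero : Int) : Bool :=
  let s : List Char := PySem.Int.toChars numero
  let s2 : List Char := PySem.List.slice s (some 2) (some ((s.length : Int) - 1))
  let t : List Char := PySem.List.sorted s2 (fun x => x) false
  ((t.zip ((PySem.List.slice t (some 1) none).zip (PySem.List.slice t (some 2) none))).any
    (fun p => p.1 == p.2.1 && p.2.1 == p.2.2))

-- ===== PRECONDITION & SPEC =====
def Spec_tercia (numero : Int) (out : Bool) : Prop := out = tercia_alt numero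
instance (numero : Int) (out : Bool) : Decidable (Spec_tercia numero out) := by unfold Spec_tercia; infer_instance

-- ===== CLAIM =====
def Claim_equal_tercia : Prop := ∀ (numero : Int), Dom_tercia numero → Spec_tercia numero (tercia numero)

-- ===== LEMMAS AND PROOFS =====

-- three equal adjacent elements somewhere in the list
def pvAdj3 : List Char → Bool
  | a :: b :: c :: r => (a == b && b == c) || pvAdj3 (b :: c :: r)
  | _ => false

-- B's zip-any expression computes pvAdj3
lemma pv_zip_any_eq_adj3 (t : List Char) :
    ((t.zip ((t.drop 1).zip (t.drop 2))).any
      (fun p => p.1 == p.2.1 && p.2.1 == p.2.2)) = pvAdj3 t := by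
  induction t with
  | nil => rfl
  | cons a t ih =>
    rcases t with _ | ⟨b, _ | ⟨c, r⟩⟩
    · rfl
    · rfl
    · simp only [List.drop_succ_cons, List.drop_zero, List.zip_cons_cons,
        List.any_cons, pvAdj3]
      rw [← ih]
      simp

lemma pv_adj3_cons {t : List Char} (a : Char) (h : pvAdj3 t = true) :
    pvAdj3 (a :: t) = true := by
  rcases t with _ | ⟨b, _ | ⟨c, r⟩⟩ <;> simp [pvAdj3] at h ⊢
  exact Or.inr h

-- adjacent triple gives a count ≥ 3
lemma pv_adj3_count {t : List Char} (h : pvAdj3 t = true) :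
    ∃ d, 3 ≤ t.count d := by
  induction t with
  | nil => simp [pvAdj3] at h
  | cons a t ih =>
    rcases t with _ | ⟨b, _ | ⟨c, r⟩⟩
    · simp [pvAdj3] at h
    · simp [pvAdj3] at h
    · simp only [pvAdj3, Bool.or_eq_true, Bool.and_eq_true, beq_iff_eq] at h
      rcases h with ⟨hab, hbc⟩ | h
      · refine ⟨a, ?_⟩
        subst hab; subst hbc
        simp
      · obtain ⟨d, hd⟩ := ih h
        exact ⟨d, le_trans hd (List.count_le_count_cons ..)⟩

-- in a ≤-sorted list whose elements all dominate d, two copies of d must head it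
lemma pv_two_head {l : List Char} {d : Char} (hp : l.Pairwise (· ≤ ·))
    (hlo : ∀ x ∈ l, d ≤ x) (hc : 2 ≤ l.count d) : ∃ r, l = d :: d :: r := by
  rcases l with _ | ⟨b, l'⟩
  · simp at hc
  · have hbd : b = d := by
      by_contra hne
      have hmem : d ∈ l' := by
        have : d ∈ b :: l' := List.count_pos_iff.mp (by omega)
        simpa [Ne.symm hne] using this
      have h1 : b ≤ d := (List.pairwise_cons.mp hp).1 d hmem
      have h2 : d ≤ b := hlo b (by simp)
      exact hne (le_antisymm h1 h2)
    have hc' : 1 ≤ l'.count d := by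
      have h : (b :: l').count d = l'.count d + 1 := by simp [hbd]
      omega
    rcases l' with _ | ⟨e, l''⟩
    · simp at hc'
    · have hed : e = d := by
        by_contra hne
        have hmem : d ∈ l'' := by
          have : d ∈ e :: l'' := List.count_pos_iff.mp (by omega)
          simpa [Ne.symm hne] using this
        have hp' : (e :: l'').Pairwise (· ≤ ·) := (List.pairwise_cons.mp hp).2
        have h1 : e ≤ d := (List.pairwise_cons.mp hp').1 d hmem
        have h2 : d ≤ e := hlo e (by simp)
        exact hne (le_antisymm h1 h2)
      exact ⟨l'', by rw [hbd, hed]⟩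

-- count ≥ 3 in a sorted list gives an adjacent triple
lemma pv_count_adj3 {t : List Char} (hp : t.Pairwise (· ≤ ·)) {d : Char}
    (hc : 3 ≤ t.count d) : pvAdj3 t = true := by
  induction t with
  | nil => simp at hc
  | cons a t ih =>
    have ha : ∀ x ∈ t, a ≤ x := (List.pairwise_cons.mp hp).1
    have hpt : t.Pairwise (· ≤ ·) := (List.pairwise_cons.mp hp).2
    by_cases had : a = d
    · subst had
      have hc2 : 2 ≤ t.count a := by simpa using hc
      obtain ⟨r, hr⟩ := pv_two_head hpt ha hc2
      subst hr
      simp [pvAdj3]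
    · have : 3 ≤ t.count d := by simpa [List.count_cons, had] using hc
      exact pv_adj3_cons a (ih hpt this)

-- Set.update by elements already present is the identity
lemma pv_update_of_subset {α : Type} [BEq α] [LawfulBEq α] (l t : List α)
    (h : ∀ x ∈ l, x ∈ t) : PySem.Set.update t l = t := by
  induction l generalizing t with
  | nil => rfl
  | cons x xs ih =>
    have hx : x ∈ t := h x (by simp)
    have hadd : PySem.Set.add t x = t := by
      simp [PySem.Set.add, PySem.Set.contains, hx]
    have : PySem.Set.update t (x :: xs) = PySem.Set.update (PySem.Set.add t x) xs := rfl
    rw [this, hadd]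
    exact ih t (fun y hy => h y (by simp [hy]))

-- the dict built by fromkeys(…, 0) answers 0 to every getD-with-default-0 query
lemma pv_getD_fromkeys_zero (ps : List Char) (d : PySem.Dict Char Int)
    (hd : ∀ c, d.getD c 0 = 0) (c : Char) :
    (ps.foldl (fun g p => g.insert p (0 : Int)) d).getD c 0 = 0 := by
  induction ps generalizing d with
  | nil => exact hd c
  | cons p ps ih =>
    exact ih (d.insert p 0) (fun c' => by rw [PySem.Dict.getD_insert]; split <;> simp [hd])

-- A computes: some distinct character of the slice occurs ≥ 3 times
lemma pv_tercia_eq_anyCount (numero : Int) :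
    tercia numero
      = (PySem.Set.ofList
          (PySem.List.slice (PySem.Int.toChars numero) (some 2)
            (some (((PySem.Int.toChars numero).length : Int) - 1)))).any
          (fun d => decide (3 ≤ ((PySem.List.slice (PySem.Int.toChars numero) (some 2)
            (some (((PySem.Int.toChars numero).length : Int) - 1))).count d : Int))) := by
  simp only [tercia]
  set s : List Char :=
    PySem.List.slice (PySem.Int.toChars numero) (some 2)
      (some (((PySem.Int.toChars numero).length : Int) - 1)) with hs
  have hofList : PySem.Dict.ofList (s.map (fun d => (d, (0 : Int))))
      = s.foldl (fun g c => g.insert c (0 : Int)) PySem.Dict.empty := by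
    show (s.map (fun d => (d, (0 : Int)))).foldl
        (fun (g : PySem.Dict Char Int) p => g.insert p.1 p.2) PySem.Dict.empty = _
    rw [List.foldl_map]
  set guia0 : PySem.Dict Char Int := s.foldl (fun g c => g.insert c (0 : Int)) PySem.Dict.empty with hg0
  have hkeys0 : guia0.keys = PySem.Set.ofList s := by
    rw [hg0, PySem.Dict.keys_foldl_insert s (fun _ _ => (0:Int)) PySem.Dict.empty]
    rfl
  have hkeys : (s.foldl (fun g digito => g.modify digito 0 (fun x => x + 1)) guia0).keys
      = PySem.Set.ofList s := by
    rw [PySem.Dict.keys_foldl_modify s 0 (fun _ _ => (fun x => x + 1)) guia0, hkeys0]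
    exact pv_update_of_subset s (PySem.Set.ofList s) (fun x hx => (PySem.Set.mem_ofList s x).mpr hx)
  have hnodup : (s.foldl (fun g digito => g.modify digito 0 (fun x => x + 1)) guia0).keys.Nodup := by
    rw [hkeys]; exact PySem.Set.nodup_ofList s
  have hgetD : ∀ c, (s.foldl (fun g digito => g.modify digito 0 (fun x => x + 1)) guia0).getD c 0
      = (s.count c : Int) := by
    intro c
    rw [PySem.Dict.getD_foldl_modify_add_one s guia0 c,
        pv_getD_fromkeys_zero s PySem.Dict.empty (fun _ => rfl) c]
    ring
  rw [hofList]
  rw [PySem.Dict.values_eq_map_keys _ hnodup 0, hkeys, List.any_map]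
  exact PySem.List.any_congr_mem (fun x _ => by simp [hgetD x])

-- ===== VERDICT =====
theorem tercia_spec : Claim_equal_tercia := by
  intro numero _
  simp only [Spec_tercia, tercia_alt]
  rw [pv_tercia_eq_anyCount]
  set s : List Char :=
    PySem.List.slice (PySem.Int.toChars numero) (some 2)
      (some (((PySem.Int.toChars numero).length : Int) - 1)) with hs
  set t : List Char := PySem.List.sorted s (fun x => x) false with ht
  have hdrop1 : PySem.List.slice t (some 1) none = t.drop 1 :=
    PySem.List.slice_from_natCast t 1
  have hdrop2 : PySem.List.slice t (some 2) none = t.drop 2 :=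
    PySem.List.slice_from_natCast t 2
  rw [hdrop1, hdrop2, pv_zip_any_eq_adj3]
  have hperm : t.Perm s := PySem.List.sorted_perm s (fun x => x) false
  have hpair : t.Pairwise (· ≤ ·) := by
    have := PySem.List.sorted_pairwise s (fun x => x)
    simpa using this
  rw [Bool.eq_iff_iff]
  constructor
  · intro h
    obtain ⟨d, _, hd⟩ := List.any_eq_true.mp h
    have hd' : 3 ≤ s.count d := by
      have := of_decide_eq_true hd
      exact_mod_cast this
    exact pv_count_adj3 hpair (by rwa [hperm.count_eq])
  · intro h
    obtain ⟨d, hd⟩ := pv_adj3_count h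
    rw [hperm.count_eq] at hd
    refine List.any_eq_true.mpr ⟨d, ?_, by simpa using (by exact_mod_cast hd : (3:Int) ≤ (s.count d : Int))⟩
    exact (PySem.Set.mem_ofList s d).mpr (List.count_pos_iff.mp (by omega))
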